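-- pv_equiv track=rewrite | github.com/ahmadbasyouni10/Codepath-Technical-Interview-102-Session-Problems | main3.py | make_smallest_watchlist
-- ===== SOURCE A (Python) =====
-- def make_smallest_watchlist(watchlist):
--     # Convert the string to a list for mutability
--     watchlist = list(watchlist)
--     # Set pointers to the beginning and end
--     l = 0
--     r = len(watchlist) - 1
--
--     # Traverse the string until the pointers meet
--     while l < r:
--         # If the characters are different
--         if watchlist[l] != watchlist[r]:
--             # Replace the greater character with the smaller one
--             if ord(watchlist[l]) < ord(watchlist[r]):
--                 watchlist[r] = watchlist[l]
--             else:
--                 watchlist[l] = watchlist[r]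
--         # Move pointers towards the center
--         l += 1
--         r -= 1
--
--     # Join the list back into a string and return it
--     return ''.join(watchlist)
-- ===== SOURCE B (Python) =====
-- def make_smallest_watchlist(watchlist):
--     # Peel the string from the outside in: emit min(first, last) for each layer,
--     # keep the peeled-off prefix, and rebuild the second half as its mirror image.
--     left = []
--     rest = watchlist
--     while len(rest) > 1:
--         m = min(rest[0], rest[-1])
--         left.append(m)
--         rest = rest[1:-1]
--     return ''.join(left) + rest + ''.join(reversed(left))
-- ===== Notes on version B (the rewrite author's own statement) =====
-- stated objective: alternative
-- what changed: Instead of A's two index pointers converging over a mutable char list and overwriting one side of each pair, B consumes the string structurally from the outside in (repeatedly slicing off both end characters), accumulates the emitted smaller end characters as the output's first half, and reconstructs the entire second half at the end as the reverse of that accumulated prefix; no mirror-index arithmetic or in-place mutation is used.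
import Mathlib
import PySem

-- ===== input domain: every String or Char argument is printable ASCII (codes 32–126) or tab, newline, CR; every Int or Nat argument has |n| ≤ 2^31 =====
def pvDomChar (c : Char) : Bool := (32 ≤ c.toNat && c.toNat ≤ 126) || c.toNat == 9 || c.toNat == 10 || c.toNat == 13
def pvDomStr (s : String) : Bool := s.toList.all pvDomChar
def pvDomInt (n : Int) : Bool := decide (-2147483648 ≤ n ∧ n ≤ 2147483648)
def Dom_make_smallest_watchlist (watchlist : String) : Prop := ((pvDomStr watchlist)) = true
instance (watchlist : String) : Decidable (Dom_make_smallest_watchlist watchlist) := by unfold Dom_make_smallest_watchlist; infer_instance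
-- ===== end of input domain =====

-- B replaces A's converging two-pointer in-place pair overwrite by an outside-in structural
-- peel that accumulates the first half and mirrors it for the second half; objective: alternative.

-- ===== PORT A =====
-- the while-loop of A: l,r pointers, mutating the char list in place
def pvLoopA (cs : List Char) (l r : Nat) : List Char :=
  if _h : l < r then
    let cl := cs.getD l ' '
    let cr := cs.getD r ' '
    let cs' :=
      if cl ≠ cr then
        if cl.toNat < cr.toNat then cs.set r cl else cs.set l cr
      else cs
    pvLoopA cs' (l + 1) (r - 1)
  else cs
termination_by r - l

def make_smallest_watchlist (watchlist : String) : String :=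
  let cs := watchlist.toList
  String.ofList (pvLoopA cs 0 (cs.length - 1))

-- ===== PORT B =====
-- min of two one-character Python strings = code-point min of the chars (first wins ties)
def pvMinChar (c d : Char) : Char := if c.toNat ≤ d.toNat then c else d

-- the while-loop of B: peel both ends of `rest` (rest[0], rest[-1], rest[1:-1]),
-- append min to `left`; at the end left + rest + reversed(left)
def pvPeelB (left : List Char) (rest : List Char) : List Char :=
  if _h : 1 < rest.length then
    let m := pvMinChar (rest.getD 0 ' ') (rest.getD (rest.length - 1) ' ')
    pvPeelB (left ++ [m]) ((rest.drop 1).dropLast)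
  else left ++ rest ++ left.reverse
termination_by rest.length
decreasing_by simp; omega

def make_smallest_watchlist_alt (watchlist : String) : String :=
  String.ofList (pvPeelB [] watchlist.toList)

-- ===== PRECONDITION & SPEC =====
def Spec_make_smallest_watchlist (watchlist : String) (out : String) : Prop := out = make_smallest_watchlist_alt watchlist
instance (watchlist : String) (out : String) : Decidable (Spec_make_smallest_watchlist watchlist out) := by unfold Spec_make_smallest_watchlist; infer_instance

-- ===== CLAIM (what is proved, stated in full; the proofs are below) =====
def Claim_equal_make_smallest_watchlist : Prop := ∀ (watchlist : String), Dom_make_smallest_watchlist watchlist → Spec_make_smallest_watchlist watchlist (make_smallest_watchlist watchlist)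

-- ===== LEMMAS AND PROOFS =====

theorem pvChar_toNat_inj (c d : Char) (h : c.toNat = d.toNat) : c = d :=
  Char.ext (UInt32.toNat_inj.mp h)

theorem pvMinChar_comm (c d : Char) : pvMinChar c d = pvMinChar d c := by
  unfold pvMinChar
  rcases Nat.lt_trichotomy c.toNat d.toNat with h | h | h
  · rw [if_pos (Nat.le_of_lt h), if_neg (Nat.not_le.mpr h)]
  · rw [pvChar_toNat_inj c d h]
  · rw [if_neg (Nat.not_le.mpr h), if_pos (Nat.le_of_lt h)]

theorem pvGetD_set_ne (cs : List Char) (i j : Nat) (a d : Char) (h : i ≠ j) :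
    (cs.set i a).getD j d = cs.getD j d := by
  simp [List.getD_eq_getElem?_getD, List.getElem?_set_ne h]

theorem pvGetD_set_self (cs : List Char) (i : Nat) (a d : Char) (h : i < cs.length) :
    (cs.set i a).getD i d = a := by
  simp [List.getD_eq_getElem?_getD, List.getElem?_set_self h]

theorem pvLoopA_length (cs : List Char) (l r : Nat) : (pvLoopA cs l r).length = cs.length := by
  fun_induction pvLoopA cs l r with
  | case1 cs l r h cl cr cs' ih =>
      rw [ih]
      simp only [cs']
      split
      · split <;> simp
      · rfl
  | case2 => rfl

theorem pvLoopA_getD (cs : List Char) (l r : Nat) (hr : r < cs.length) (j : Nat) :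
    (pvLoopA cs l r).getD j ' ' =
      if l ≤ j ∧ j ≤ r then pvMinChar (cs.getD j ' ') (cs.getD (l + r - j) ' ')
      else cs.getD j ' ' := by
  fun_induction pvLoopA cs l r with
  | case1 cs l r h cl cr cs' ih =>
      have hl : l < cs.length := lt_trans h hr
      have hlr : l ≠ r := Nat.ne_of_lt h
      have hlen' : cs'.length = cs.length := by
        simp only [cs']
        split
        · split <;> simp
        · rfl
      -- the single loop step writes pvMinChar cl cr at both l and r, touching nothing else
      have hm : ∀ k, cs'.getD k ' ' =
          if k = l ∨ k = r then pvMinChar cl cr else cs.getD k ' ' := by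
        intro k
        simp only [cs']
        by_cases hne : cl ≠ cr
        · rw [dif_pos hne]
          by_cases hlt : cl.toNat < cr.toNat
          · rw [dif_pos hlt]
            have hmin : pvMinChar cl cr = cl := by
              unfold pvMinChar; rw [if_pos (Nat.le_of_lt hlt)]
            by_cases hk : k = l ∨ k = r
            · rw [if_pos hk, hmin]
              rcases hk with hk | hk
              · rw [hk, pvGetD_set_ne cs r l cl ' ' (Ne.symm hlr)]
              · rw [hk, pvGetD_set_self cs r cl ' ' hr]
            · rw [if_neg hk]
              push Not at hk
              exact pvGetD_set_ne cs r k cl ' ' (fun e => hk.2 e.symm)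
          · rw [dif_neg hlt]
            have hmin : pvMinChar cl cr = cr := by
              unfold pvMinChar
              rw [if_neg (fun hle => hne (pvChar_toNat_inj cl cr (Nat.le_antisymm hle (Nat.le_of_not_lt hlt))))]
            by_cases hk : k = l ∨ k = r
            · rw [if_pos hk, hmin]
              rcases hk with hk | hk
              · rw [hk, pvGetD_set_self cs l cr ' ' hl]
              · rw [hk, pvGetD_set_ne cs l r cr ' ' hlr]
            · rw [if_neg hk]
              push Not at hk
              exact pvGetD_set_ne cs l k cr ' ' (fun e => hk.1 e.symm)
        · rw [dif_neg hne]
          push Not at hne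
          by_cases hk : k = l ∨ k = r
          · rw [if_pos hk]
            have hmin : pvMinChar cl cr = cl := by
              unfold pvMinChar; rw [hne, if_pos (Nat.le_refl _)]
            rw [hmin]
            rcases hk with hk | hk
            · rw [hk]
            · rw [hk]; exact hne.symm
          · rw [if_neg hk]
      have hr' : r - 1 < cs'.length := by omega
      rw [ih hr']
      by_cases hj : l ≤ j ∧ j ≤ r
      · rw [if_pos hj]
        by_cases hin : l + 1 ≤ j ∧ j ≤ r - 1
        · -- strictly inside: both j and its mirror are untouched by this step
          rw [if_pos hin]
          have e1 : cs'.getD j ' ' = cs.getD j ' ' := by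
            rw [hm]
            have : ¬ (j = l ∨ j = r) := by omega
            rw [if_neg this]
          have e2 : cs'.getD (l + 1 + (r - 1) - j) ' ' = cs.getD (l + r - j) ' ' := by
            have heq : l + 1 + (r - 1) - j = l + r - j := by omega
            rw [heq, hm]
            have : ¬ (l + r - j = l ∨ l + r - j = r) := by omega
            rw [if_neg this]
          rw [e1, e2]
        · -- j is l or r: this step wrote the min there
          rw [if_neg hin]
          have hjl : j = l ∨ j = r := by omega
          rw [hm, if_pos hjl]
          rcases hjl with hk | hk
          · have hidx : l + r - j = r := by omega
            rw [hidx, hk]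
          · have hidx : l + r - j = l := by omega
            rw [hidx, hk, pvMinChar_comm]
      · rw [if_neg hj]
        have h1 : ¬ (l + 1 ≤ j ∧ j ≤ r - 1) := by omega
        rw [if_neg h1, hm]
        have : ¬ (j = l ∨ j = r) := by omega
        rw [if_neg this]
  | case2 cs l r h =>
      by_cases hj : l ≤ j ∧ j ≤ r
      · have h1 : j = l := by omega
        have h2 : j = r := by omega
        rw [if_pos hj]
        have hidx : l + r - j = j := by omega
        rw [hidx]  -- note j = l = r, so the mirror index is j itself
        unfold pvMinChar
        rw [if_pos (Nat.le_refl _)]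
      · rw [if_neg hj]

-- the pure layer-by-layer result of the peel, with the accumulator abstracted away
def pvM (cs : List Char) : List Char :=
  if _h : 1 < cs.length then
    let m := pvMinChar (cs.getD 0 ' ') (cs.getD (cs.length - 1) ' ')
    (m :: pvM ((cs.drop 1).dropLast)) ++ [m]
  else cs
termination_by cs.length
decreasing_by simp; omega

theorem pvPeelB_eq_pvM (left rest : List Char) :
    pvPeelB left rest = left ++ pvM rest ++ left.reverse := by
  fun_induction pvPeelB left rest with
  | case1 left rest h m ih =>
      rw [ih]
      conv_rhs => rw [pvM]
      rw [dif_pos h]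
      simp [List.append_assoc, m]
  | case2 left rest h =>
      rw [pvM, dif_neg h]

theorem pvM_length (cs : List Char) : (pvM cs).length = cs.length := by
  fun_induction pvM cs with
  | case1 cs h m ih => simp at ih ⊢; omega
  | case2 => rfl

theorem pvInner_getD (cs : List Char) (k : Nat) (hk : k < cs.length - 2) :
    ((cs.drop 1).dropLast).getD k ' ' = cs.getD (k + 1) ' ' := by
  have h1 : ((cs.drop 1).dropLast).length = cs.length - 2 := by
    simp only [List.length_dropLast, List.length_drop]; omega
  have hk1 : k < ((cs.drop 1).dropLast).length := by omega
  have hk2 : k + 1 < cs.length := by omega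
  rw [List.getD_eq_getElem?_getD, List.getElem?_eq_getElem hk1,
      List.getD_eq_getElem?_getD, List.getElem?_eq_getElem hk2]
  simp [List.getElem_dropLast]

theorem pvM_getD (cs : List Char) :
    ∀ j, j < cs.length →
    (pvM cs).getD j ' ' = pvMinChar (cs.getD j ' ') (cs.getD (cs.length - 1 - j) ' ') := by
  fun_induction pvM cs with
  | case1 cs h m ih =>
      intro j hj
      have hlen : ((cs.drop 1).dropLast).length = cs.length - 2 := by
        simp only [List.length_dropLast, List.length_drop]; omega
      have hMlen : (pvM ((cs.drop 1).dropLast)).length = cs.length - 2 := by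
        rw [pvM_length, hlen]
      have hclen : (m :: pvM ((cs.drop 1).dropLast)).length = cs.length - 1 := by
        simp only [List.length_cons, hMlen]; omega
      by_cases h0 : j = 0
      · subst h0
        simp only [List.getD_eq_getElem?_getD]
        rw [List.getElem?_append_left (by omega : (0:Nat) < (m :: pvM ((cs.drop 1).dropLast)).length)]
        simp only [List.getElem?_cons_zero, Option.getD_some, Nat.sub_zero]
        simp only [m, List.getD_eq_getElem?_getD]
      · by_cases hlast : j = cs.length - 1
        · -- last position: the trailing [m]
          simp only [List.getD_eq_getElem?_getD]
          rw [List.getElem?_append_right (by omega)]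
          have hz : j - (m :: pvM ((cs.drop 1).dropLast)).length = 0 := by omega
          rw [hz]
          have hmir : cs.length - 1 - j = 0 := by omega
          rw [hmir]
          simp only [List.getElem?_cons_zero, Option.getD_some]
          rw [hlast, pvMinChar_comm]
          simp only [m, List.getD_eq_getElem?_getD]
        · -- interior: comes from the recursive call at index j - 1
          have hjr : 1 ≤ j ∧ j ≤ cs.length - 2 := by omega
          simp only [List.getD_eq_getElem?_getD]
          rw [List.getElem?_append_left (by omega)]
          have hcons : (m :: pvM ((cs.drop 1).dropLast))[j]? =
              (pvM ((cs.drop 1).dropLast))[j - 1]? := by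
            cases j with
            | zero => omega
            | succ k => simp
          rw [hcons]
          have hj1 : j - 1 < (pvM ((cs.drop 1).dropLast)).length := by omega
          rw [List.getElem?_eq_getElem hj1, Option.getD_some]
          have hgd : (pvM ((cs.drop 1).dropLast))[j - 1] =
              (pvM ((cs.drop 1).dropLast)).getD (j - 1) ' ' := by
            rw [List.getD_eq_getElem?_getD, List.getElem?_eq_getElem hj1]; rfl
          rw [hgd, ih (j - 1) (by omega)]
          rw [pvInner_getD cs (j - 1) (by omega),
              pvInner_getD cs (((cs.drop 1).dropLast).length - 1 - (j - 1)) (by omega)]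
          -- align the index arithmetic of the two mirror positions
          have e1 : j - 1 + 1 = j := by omega
          have e2 : ((cs.drop 1).dropLast).length - 1 - (j - 1) + 1 = cs.length - 1 - j := by
            rw [hlen]; omega
          rw [e1, e2]
          simp only [List.getD_eq_getElem?_getD]
  | case2 cs h =>
      intro j hj
      have h0 : j = 0 := by omega
      subst h0
      have : cs.length - 1 - 0 = 0 := by omega
      rw [this]
      unfold pvMinChar
      rw [if_pos (Nat.le_refl _)]

-- ===== VERDICT (by name: the statement is the Claim_ definition above) =====
theorem make_smallest_watchlist_spec : Claim_equal_make_smallest_watchlist := by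
  intro s _
  unfold Spec_make_smallest_watchlist make_smallest_watchlist make_smallest_watchlist_alt
  simp only []
  rw [pvPeelB_eq_pvM]
  simp only [List.nil_append, List.reverse_nil, List.append_nil]
  congr 1
  set cs := s.toList with hcs
  rcases Nat.eq_zero_or_pos cs.length with h0 | hpos
  · rw [List.length_eq_zero_iff.mp h0]; simp [pvLoopA, pvM]
  · have hr : cs.length - 1 < cs.length := by omega
    apply List.ext_getElem
    · rw [pvLoopA_length, pvM_length]
    · intro i hi1 hi2
      have hi : i < cs.length := by rwa [pvLoopA_length] at hi1
      have hA : (pvLoopA cs 0 (cs.length - 1))[i] = (pvLoopA cs 0 (cs.length - 1)).getD i ' ' := by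
        rw [List.getD_eq_getElem?_getD, List.getElem?_eq_getElem hi1]; rfl
      have hB : (pvM cs)[i] = (pvM cs).getD i ' ' := by
        rw [List.getD_eq_getElem?_getD, List.getElem?_eq_getElem hi2]; rfl
      rw [hA, hB, pvLoopA_getD cs 0 (cs.length - 1) hr i, pvM_getD cs i hi]
      have hcond : 0 ≤ i ∧ i ≤ cs.length - 1 := ⟨Nat.zero_le _, by omega⟩
      rw [if_pos hcond]
      have : (0 : Nat) + (cs.length - 1) - i = cs.length - 1 - i := by omega
      rw [this]
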